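-- pv_equiv track=rewrite | github.com/nixonwidjaja/advent-of-code-2023 | day13/main.py | generate_changes
-- ===== SOURCE A (Python) =====
-- def can_transform(a, b):
--     count = 0
--     for i in range(len(a)):
--         if a[i] != b[i]:
--             count += 1
--     return count == 1
--
-- def generate_changes(rows):
--     changes = []
--     for k1, v1 in rows.items():
--         for k2, v2 in rows.items():
--             if not can_transform(k1, k2):
--                 continue
--             for i in v1:
--                 changes.append((i, k2))
--             for i in v2:
--                 changes.append((i, k1))
--     return changes
-- ===== SOURCE B (Python) =====
-- def generate_changes(rows):
--     # The one-char-difference relation is only meaningful when all keys have the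
--     # same length (grid rows); A dies mid-scan with IndexError on ragged input,
--     # B validates up front and fails fast.
--     lengths = {len(k) for k in rows}
--     if len(lengths) > 1:
--         raise ValueError("keys must all have the same length")
--     items = list(rows.items())
--     n = len(items)
--     # bucket each index j under the L one-hole masks (i, k[:i], k[i+1:]) of its key:
--     # two distinct keys share a bucket exactly when they differ in that one position
--     buckets = {}
--     for j, (k, _v) in enumerate(items):
--         for i in range(len(k)):
--             buckets.setdefault((i, k[:i], k[i + 1:]), []).append(j)
--     matched = set()
--     for js in buckets.values():
--         for a in js:
--             for b in js:
--                 if a != b: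
--                     matched.add((a, b))
--     changes = []
--     for j1 in range(n):
--         for j2 in range(n):
--             if (j1, j2) in matched:
--                 k1, v1 = items[j1]
--                 k2, v2 = items[j2]
--                 for i in v1:
--                     changes.append((i, k2))
--                 for i in v2:
--                     changes.append((i, k1))
--     return changes
-- ===== Notes on version B (the rewrite author's own statement) =====
-- stated objective: faster
-- what changed: A compares every ordered pair of dict keys character by character (can_transform); B instead buckets each key once under its L one-hole masks (i, k[:i], k[i+1:]), reads the matching index pairs off the buckets into a set, and emits the output blocks by scanning index pairs in insertion order, so the O(n^2*L) pairwise hamming scan disappears; B also validates up front that all keys share one length (raising ValueError) where A dies mid-scan with IndexError.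
import Mathlib
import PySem

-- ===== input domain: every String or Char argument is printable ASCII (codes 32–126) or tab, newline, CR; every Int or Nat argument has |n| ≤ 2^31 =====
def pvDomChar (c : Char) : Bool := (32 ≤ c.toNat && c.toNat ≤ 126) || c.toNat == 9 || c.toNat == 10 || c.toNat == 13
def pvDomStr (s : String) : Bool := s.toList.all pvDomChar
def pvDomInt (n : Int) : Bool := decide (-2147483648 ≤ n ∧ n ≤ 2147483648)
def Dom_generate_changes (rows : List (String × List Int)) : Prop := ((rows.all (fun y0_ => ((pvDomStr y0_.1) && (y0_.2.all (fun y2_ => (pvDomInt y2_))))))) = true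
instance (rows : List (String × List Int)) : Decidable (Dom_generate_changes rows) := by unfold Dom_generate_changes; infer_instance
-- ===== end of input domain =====

-- B replaces A's all-pairs hamming scan (O(n²·L) character work) by bucketing each key once
-- under its L one-hole masks, so matching key pairs are read off the buckets; objective: faster.

-- ===== PORT A =====
-- count of differing positions over range(len(a)); b[i] raises IndexError when b is shorter —
-- Pre_ excludes key sets of unequal lengths, so the pyGetD default ' ' is never consulted.
def can_transform (a b : String) : Bool :=
  ((PySem.List.pyRange 0 (PySem.Str.len a) 1).foldl
      (fun count i =>
        if PySem.List.pyGetD a.toList i ' ' ≠ PySem.List.pyGetD b.toList i ' ' then count + 1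
        else count) (0 : Int)) == 1

-- body of A over the dict's item list
def gcA (items : List (String × List Int)) : List (Int × String) :=
  items.foldl (fun changes p1 =>
    items.foldl (fun changes p2 =>
      if !(can_transform p1.1 p2.1) then changes
      else
        p2.2.foldl (fun c i => c ++ [(i, p1.1)])
          (p1.2.foldl (fun c i => c ++ [(i, p2.1)]) changes)) changes) []

def generate_changes (rows : List (String × List Int)) : List (Int × String) :=
  gcA (PySem.Dict.ofList rows).items

-- ===== PORT B =====
-- the bucket key (i, k[:i], k[i+1:]) of Source B (string slices taken on the char list; exact)
def gcMask (k : List Char) (i : Int) : Int × List Char × List Char :=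
  (i, PySem.List.slice k none (some i), PySem.List.slice k (some (i + 1)) none)

-- buckets.setdefault((i, k[:i], k[i+1:]), []).append(j)  =  modify key [] (· ++ [j])
def gcBuckets (items : List (String × List Int)) : PySem.Dict (Int × List Char × List Char) (List Int) :=
  (PySem.List.enumerate items 0).foldl (fun b p =>
    (PySem.List.pyRange 0 (PySem.Str.len p.2.1) 1).foldl (fun b i =>
      b.modify (gcMask p.2.1.toList i) [] (· ++ [p.1])) b) PySem.Dict.empty

def gcMatched (items : List (String × List Int)) : PySem.Set (Int × Int) :=
  (gcBuckets items).values.foldl (fun m js =>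
    js.foldl (fun m a =>
      js.foldl (fun m b => if a ≠ b then PySem.Set.add m (a, b) else m) m) m) PySem.Set.empty

-- body of B over the dict's item list
def gcB (items : List (String × List Int)) : List (Int × String) :=
  let n : Int := (items.length : Int)
  let matched := gcMatched items
  (PySem.List.pyRange 0 n 1).foldl (fun changes j1 =>
    (PySem.List.pyRange 0 n 1).foldl (fun changes j2 =>
      if (j1, j2) ∈ matched then
        let p1 := PySem.List.pyGetD items j1 ("", [])
        let p2 := PySem.List.pyGetD items j2 ("", [])
        p2.2.foldl (fun c i => c ++ [(i, p1.1)])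
          (p1.2.foldl (fun c i => c ++ [(i, p2.1)]) changes)
      else changes) changes) []

-- B validates up front that all keys have one length and raises ValueError otherwise
-- (its bucket pairing is only meaningful for equal-length keys; A raises IndexError
-- mid-scan on the same inputs). The port returns [] where Python B raises; those
-- inputs lie outside Pre_ and nothing is claimed there.
def generate_changes_alt (rows : List (String × List Int)) : List (Int × String) :=
  let lengths : PySem.Set Int :=
    PySem.Set.ofList ((PySem.Dict.ofList rows).keys.map (fun k => PySem.Str.len k))
  if 1 < PySem.Set.len lengths then []  -- ValueError in Python B
  else gcB (PySem.Dict.ofList rows).items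

-- ===== PRECONDITION & SPEC =====
-- Pre_ excludes inputs whose keys do not all have the same length: on those A always raises
-- IndexError (can_transform is called with both orders of any two keys, and b[i] overruns the
-- shorter one), so Pre_ is exactly the set of inputs on which A returns.
def Pre_generate_changes (rows : List (String × List Int)) : Prop :=
  ∀ p ∈ rows, ∀ q ∈ rows, p.1.toList.length = q.1.toList.length
instance (rows : List (String × List Int)) : Decidable (Pre_generate_changes rows) := by
  unfold Pre_generate_changes; infer_instance

def pvWitness_generate_changes : (List (String × List Int)) := [("ab", [1]), ("cb", [2]), ("aa", [3])]

def Spec_generate_changes (rows : List (String × List Int)) (out : List (Int × String)) : Prop := out = generate_changes_alt rows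
instance (rows : List (String × List Int)) (out : List (Int × String)) : Decidable (Spec_generate_changes rows out) := by unfold Spec_generate_changes; infer_instance

-- ===== CLAIM (what is proved, stated in full; the proofs are below) =====
def Claim_equal_generate_changes : Prop := ∀ (rows : List (String × List Int)), Dom_generate_changes rows → Pre_generate_changes rows → Spec_generate_changes rows (generate_changes rows)

-- ===== LEMMAS AND PROOFS =====

-- the block of output appended for one matching ordered pair
def gcBlock (p1 p2 : String × List Int) : List (Int × String) :=
  p1.2.map (fun i => (i, p2.1)) ++ p2.2.map (fun i => (i, p1.1))

-- the stream of (bucket-key, index) insertions Source B performs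
def gcStream (items : List (String × List Int)) : List ((Int × List Char × List Char) × Int) :=
  (PySem.List.enumerate items 0).flatMap (fun p =>
    (PySem.List.pyRange 0 (PySem.Str.len p.2.1) 1).map (fun i => (gcMask p.2.1.toList i, p.1)))

theorem gcA_flatMap (items : List (String × List Int)) :
    gcA items = items.flatMap (fun p1 => items.flatMap (fun p2 =>
      if can_transform p1.1 p2.1 then gcBlock p1 p2 else [])) := by
  unfold gcA
  have h1 : ∀ (p1 : String × List Int) (changes : List (Int × String)),
      items.foldl (fun changes p2 =>
        if !(can_transform p1.1 p2.1) then changes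
        else p2.2.foldl (fun c i => c ++ [(i, p1.1)])
          (p1.2.foldl (fun c i => c ++ [(i, p2.1)]) changes)) changes
      = changes ++ items.flatMap (fun p2 =>
          if can_transform p1.1 p2.1 then gcBlock p1 p2 else []) := by
    intro p1 changes
    rw [show (fun (changes : List (Int × String)) (p2 : String × List Int) =>
        if !(can_transform p1.1 p2.1) then changes
        else p2.2.foldl (fun c i => c ++ [(i, p1.1)])
          (p1.2.foldl (fun c i => c ++ [(i, p2.1)]) changes))
      = (fun changes p2 => changes ++ (if can_transform p1.1 p2.1 then gcBlock p1 p2 else [])) by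
        funext changes p2
        by_cases hc : can_transform p1.1 p2.1
        · rw [PySem.List.foldl_append_singleton_eq_map, PySem.List.foldl_append_singleton_eq_map]
          simp [hc, gcBlock]
        · simp [hc]]
    exact PySem.List.foldl_append_eq_flatMap _ _ _
  rw [show (fun (changes : List (Int × String)) (p1 : String × List Int) =>
      items.foldl (fun changes p2 =>
        if !(can_transform p1.1 p2.1) then changes
        else p2.2.foldl (fun c i => c ++ [(i, p1.1)])
          (p1.2.foldl (fun c i => c ++ [(i, p2.1)]) changes)) changes)
    = (fun changes p1 => changes ++ items.flatMap (fun p2 =>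
        if can_transform p1.1 p2.1 then gcBlock p1 p2 else [])) by
      funext changes p1; exact h1 p1 changes]
  exact PySem.List.foldl_append_eq_flatMap _ _ _

theorem gcB_flatMap (items : List (String × List Int)) :
    gcB items = (PySem.List.pyRange 0 (items.length : Int) 1).flatMap (fun j1 =>
      (PySem.List.pyRange 0 (items.length : Int) 1).flatMap (fun j2 =>
        if (j1, j2) ∈ gcMatched items then
          gcBlock (PySem.List.pyGetD items j1 ("", [])) (PySem.List.pyGetD items j2 ("", []))
        else [])) := by
  unfold gcB
  dsimp only
  have h1 : ∀ (j1 : Int) (changes : List (Int × String)),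
      (PySem.List.pyRange 0 (items.length : Int) 1).foldl (fun changes j2 =>
        if (j1, j2) ∈ gcMatched items then
          (PySem.List.pyGetD items j2 ("", [])).2.foldl
            (fun c i => c ++ [(i, (PySem.List.pyGetD items j1 ("", [])).1)])
            ((PySem.List.pyGetD items j1 ("", [])).2.foldl
              (fun c i => c ++ [(i, (PySem.List.pyGetD items j2 ("", [])).1)]) changes)
        else changes) changes
      = changes ++ (PySem.List.pyRange 0 (items.length : Int) 1).flatMap (fun j2 =>
          if (j1, j2) ∈ gcMatched items then
            gcBlock (PySem.List.pyGetD items j1 ("", [])) (PySem.List.pyGetD items j2 ("", []))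
          else []) := by
    intro j1 changes
    rw [show (fun (changes : List (Int × String)) (j2 : Int) =>
        if (j1, j2) ∈ gcMatched items then
          (PySem.List.pyGetD items j2 ("", [])).2.foldl
            (fun c i => c ++ [(i, (PySem.List.pyGetD items j1 ("", [])).1)])
            ((PySem.List.pyGetD items j1 ("", [])).2.foldl
              (fun c i => c ++ [(i, (PySem.List.pyGetD items j2 ("", [])).1)]) changes)
        else changes)
      = (fun changes j2 => changes ++ (if (j1, j2) ∈ gcMatched items then
          gcBlock (PySem.List.pyGetD items j1 ("", [])) (PySem.List.pyGetD items j2 ("", []))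
        else [])) by
        funext changes j2
        by_cases hc : (j1, j2) ∈ gcMatched items
        · rw [PySem.List.foldl_append_singleton_eq_map, PySem.List.foldl_append_singleton_eq_map]
          simp [hc, gcBlock]
        · simp [hc]]
    exact PySem.List.foldl_append_eq_flatMap _ _ _
  rw [show (fun (changes : List (Int × String)) (j1 : Int) =>
      (PySem.List.pyRange 0 (items.length : Int) 1).foldl (fun changes j2 =>
        if (j1, j2) ∈ gcMatched items then
          (PySem.List.pyGetD items j2 ("", [])).2.foldl
            (fun c i => c ++ [(i, (PySem.List.pyGetD items j1 ("", [])).1)])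
            ((PySem.List.pyGetD items j1 ("", [])).2.foldl
              (fun c i => c ++ [(i, (PySem.List.pyGetD items j2 ("", [])).1)]) changes)
        else changes) changes)
    = (fun changes j1 => changes ++ (PySem.List.pyRange 0 (items.length : Int) 1).flatMap (fun j2 =>
        if (j1, j2) ∈ gcMatched items then
          gcBlock (PySem.List.pyGetD items j1 ("", [])) (PySem.List.pyGetD items j2 ("", []))
        else [])) by
      funext changes j1; exact h1 j1 changes]
  exact PySem.List.foldl_append_eq_flatMap _ _ _

theorem gcBuckets_stream (items : List (String × List Int)) :
    gcBuckets items = (gcStream items).foldl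
      (fun d q => d.modify q.1 [] (· ++ [q.2])) PySem.Dict.empty := by
  unfold gcBuckets gcStream
  simp only [List.flatMap_def, List.foldl_flatten, List.foldl_map]

theorem mem_pair_inner (a : Int) (js : List Int) (m : PySem.Set (Int × Int)) (x : Int × Int) :
    x ∈ js.foldl (fun m b => if a ≠ b then PySem.Set.add m (a, b) else m) m ↔
      x ∈ m ∨ ∃ b ∈ js, a ≠ b ∧ x = (a, b) := by
  induction js generalizing m with
  | nil => simp
  | cons b t ih =>
    simp only [List.foldl_cons, ih]
    by_cases hab : a = b
    · simp [hab]
    · simp [hab, PySem.Set.mem_add]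
      tauto

theorem mem_pair_outer (l js : List Int) (m : PySem.Set (Int × Int)) (x : Int × Int) :
    x ∈ l.foldl (fun m a =>
        js.foldl (fun m b => if a ≠ b then PySem.Set.add m (a, b) else m) m) m ↔
      x ∈ m ∨ ∃ a ∈ l, ∃ b ∈ js, a ≠ b ∧ x = (a, b) := by
  induction l generalizing m with
  | nil => simp
  | cons a t ih =>
    simp only [List.foldl_cons, ih, mem_pair_inner, List.mem_cons]
    aesop

theorem mem_pair_vals (vals : List (List Int)) (m : PySem.Set (Int × Int)) (x : Int × Int) :
    x ∈ vals.foldl (fun m js =>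
        js.foldl (fun m a =>
          js.foldl (fun m b => if a ≠ b then PySem.Set.add m (a, b) else m) m) m) m ↔
      x ∈ m ∨ ∃ js ∈ vals, ∃ a ∈ js, ∃ b ∈ js, a ≠ b ∧ x = (a, b) := by
  induction vals generalizing m with
  | nil => simp
  | cons js t ih =>
    simp only [List.foldl_cons, ih, mem_pair_outer, List.mem_cons]
    aesop

theorem nodup_keys_gcBuckets (items : List (String × List Int)) :
    (gcBuckets items).keys.Nodup := by
  rw [gcBuckets_stream]
  exact PySem.Dict.nodup_keys_foldl_modify_key (gcStream items)
    (fun (q : (Int × List Char × List Char) × Int) => q.1) []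
    (fun _ q => (· ++ [q.2])) PySem.Dict.empty PySem.Dict.nodup_keys_empty

theorem keys_gcBuckets (items : List (String × List Int)) :
    (gcBuckets items).keys = PySem.Set.ofList ((gcStream items).map (·.1)) := by
  rw [gcBuckets_stream]
  have h := PySem.Dict.keys_foldl_modify_key (gcStream items) (fun q => q.1)
    ([] : List Int) (fun _ q => (· ++ [q.2])) PySem.Dict.empty
  simpa [PySem.Set.update] using h

theorem getD_gcBuckets (items : List (String × List Int)) (c : Int × List Char × List Char) :
    (gcBuckets items).getD c [] = ((gcStream items).filter (fun q => q.1 == c)).map (·.2) := by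
  rw [gcBuckets_stream]
  have h := PySem.Dict.getD_foldl_modify_append (gcStream items) PySem.Dict.empty c
  simpa using h

theorem mem_bucketOf (items : List (String × List Int)) (c : Int × List Char × List Char) (j : Int) :
    j ∈ (gcBuckets items).getD c [] ↔ (c, j) ∈ gcStream items := by
  rw [getD_gcBuckets]
  simp only [List.mem_map, List.mem_filter]
  constructor
  · rintro ⟨q, ⟨hq, hqc⟩, hqj⟩
    have : q = (c, j) := by
      cases q; simp_all
    rwa [this] at hq
  · intro h
    exact ⟨(c, j), ⟨h, by simp⟩, rfl⟩

theorem mem_gcMatched (items : List (String × List Int)) (x : Int × Int) :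
    x ∈ gcMatched items ↔
      ∃ c, (c, x.1) ∈ gcStream items ∧ (c, x.2) ∈ gcStream items ∧ x.1 ≠ x.2 := by
  unfold gcMatched
  rw [mem_pair_vals]
  have hvals : (gcBuckets items).values =
      (gcBuckets items).keys.map (fun k => (gcBuckets items).getD k []) :=
    PySem.Dict.values_eq_map_keys _ (nodup_keys_gcBuckets items) []
  constructor
  · rintro (h | ⟨js, hjs, a, ha, b, hb, hab, hx⟩)
    · simp [PySem.Set.empty] at h
    · rw [hvals] at hjs
      obtain ⟨c, hc, rfl⟩ := List.mem_map.mp hjs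
      refine ⟨c, ?_, ?_, ?_⟩
      · rw [hx]; exact (mem_bucketOf items c a).mp ha
      · rw [hx]; exact (mem_bucketOf items c b).mp hb
      · rw [hx]; exact hab
  · rintro ⟨c, h1, h2, hne⟩
    right
    have hck : c ∈ (gcBuckets items).keys := by
      rw [keys_gcBuckets]
      rw [PySem.Set.mem_ofList]
      exact List.mem_map.mpr ⟨(c, x.1), h1, rfl⟩
    refine ⟨(gcBuckets items).getD c [], ?_, x.1, ?_, x.2, ?_, hne, rfl⟩
    · rw [hvals]; exact List.mem_map.mpr ⟨c, hck, rfl⟩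
    · exact (mem_bucketOf items c x.1).mpr h1
    · exact (mem_bucketOf items c x.2).mpr h2

theorem mem_gcStream (items : List (String × List Int)) (c : Int × List Char × List Char) (j : Int) :
    (c, j) ∈ gcStream items ↔
      ∃ (k : Nat) (h : k < items.length), j = (k : Int) ∧
        ∃ i : Int, 0 ≤ i ∧ i < (items[k].1.toList.length : Int) ∧ c = gcMask items[k].1.toList i := by
  unfold gcStream
  simp only [List.mem_flatMap, PySem.List.mem_enumerate_iff, List.mem_map,
    PySem.List.mem_pyRange_one, PySem.Str.len_eq]
  constructor
  · rintro ⟨p, ⟨k, hk, rfl⟩, i, ⟨hi0, hi1⟩, heq⟩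
    obtain ⟨hc, hj⟩ := Prod.mk.injEq .. ▸ heq
    exact ⟨k, hk, by omega, i, hi0, by simpa using hi1, hc.symm⟩
  · rintro ⟨k, hk, rfl, i, hi0, hi1, rfl⟩
    exact ⟨((k : Int), items[k]), ⟨k, hk, by simp⟩, i, ⟨hi0, by simpa using hi1⟩, by simp⟩

theorem range_fold_count (xs : List Char) : ∀ (ys : List Char), xs.length = ys.length →
    ∀ (c0 : Int),
    (List.range xs.length).foldl
      (fun c k => if xs.getD k ' ' ≠ ys.getD k ' ' then c + 1 else c) c0
      = c0 + ((xs.zip ys).countP (fun q => decide (q.1 ≠ q.2)) : Int) := by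
  induction xs with
  | nil => intro ys h c0; simp
  | cons x xs ih =>
    intro ys h c0
    cases ys with
    | nil => simp at h
    | cons y ys =>
      simp only [List.length_cons, List.range_succ_eq_map, List.foldl_cons, List.foldl_map,
        List.getD_cons_zero, List.getD_cons_succ]
      rw [ih ys (by simpa using h)]
      by_cases hxy : x = y
      · simp [hxy]
      · simp [hxy]
        ring

theorem can_transform_countP (a b : String) (h : a.toList.length = b.toList.length) :
    can_transform a b = true ↔
      (a.toList.zip b.toList).countP (fun q => decide (q.1 ≠ q.2)) = 1 := by
  unfold can_transform
  rw [PySem.Str.len_eq, PySem.List.pyRange_zero_natCast, List.foldl_map]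
  have hcongr : (List.range a.toList.length).foldl
      (fun count k => if PySem.List.pyGetD a.toList ((k : Nat) : Int) ' ' ≠
          PySem.List.pyGetD b.toList ((k : Nat) : Int) ' ' then count + 1 else count) (0 : Int)
      = (List.range a.toList.length).foldl
      (fun c k => if a.toList.getD k ' ' ≠ b.toList.getD k ' ' then c + 1 else c) (0 : Int) := by
    apply PySem.List.foldl_congr_mem
    intro acc k _
    rw [PySem.List.pyGetD_natCast, PySem.List.pyGetD_natCast]
  rw [hcongr, range_fold_count a.toList b.toList h 0]
  simp only [zero_add, beq_iff_eq]
  omega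

theorem zip_countP_eq_zero (xs : List Char) : ∀ ys : List Char, xs.length = ys.length →
    ((xs.zip ys).countP (fun q => decide (q.1 ≠ q.2)) = 0 ↔ xs = ys) := by
  induction xs with
  | nil => intro ys h; cases ys <;> simp_all
  | cons x xs ih =>
    intro ys h
    cases ys with
    | nil => simp at h
    | cons y ys =>
      have := ih ys (by simpa using h)
      by_cases hxy : x = y
      · simp_all
      · simp_all

theorem one_diff_iff (xs : List Char) : ∀ ys : List Char, xs.length = ys.length → xs ≠ ys →
    ((∃ t : Nat, t < xs.length ∧ xs.take t = ys.take t ∧ xs.drop (t + 1) = ys.drop (t + 1)) ↔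
      (xs.zip ys).countP (fun q => decide (q.1 ≠ q.2)) = 1) := by
  induction xs with
  | nil => intro ys h hne; cases ys <;> simp_all
  | cons x xs ih =>
    intro ys h hne
    cases ys with
    | nil => simp at h
    | cons y ys =>
      have hlen : xs.length = ys.length := by simpa using h
      by_cases hxy : x = y
      · subst hxy
        have hne' : xs ≠ ys := fun he => hne (by rw [he])
        rw [show ((x :: xs).zip (x :: ys)).countP (fun q => decide (q.1 ≠ q.2))
            = (xs.zip ys).countP (fun q => decide (q.1 ≠ q.2)) by simp]
        rw [← ih ys hlen hne']
        constructor
        · rintro ⟨t, ht, htake, hdrop⟩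
          cases t with
          | zero =>
            exact absurd (by simpa using hdrop) hne'
          | succ t' =>
            refine ⟨t', by simpa using ht, ?_, by simpa using hdrop⟩
            simpa using htake
        · rintro ⟨t, ht, htake, hdrop⟩
          exact ⟨t + 1, by simpa using ht, by simpa using htake, by simpa using hdrop⟩
      · rw [show ((x :: xs).zip (y :: ys)).countP (fun q => decide (q.1 ≠ q.2))
            = (xs.zip ys).countP (fun q => decide (q.1 ≠ q.2)) + 1 by simp [hxy]]
        rw [show ((xs.zip ys).countP (fun q => decide (q.1 ≠ q.2)) + 1 = 1) ↔
            ((xs.zip ys).countP (fun q => decide (q.1 ≠ q.2)) = 0) by omega]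
        rw [zip_countP_eq_zero xs ys hlen]
        constructor
        · rintro ⟨t, ht, htake, hdrop⟩
          cases t with
          | zero => simpa using hdrop
          | succ t' =>
            have : x = y := by
              have := congrArg (fun l => l.head?) htake
              simpa using this
            exact absurd this hxy
        · intro he
          exact ⟨0, by simp, by simp, by simpa using he⟩

theorem mask_iff_one_diff (xs ys : List Char) (hlen : xs.length = ys.length) (hne : xs ≠ ys) :
    (∃ i : Int, 0 ≤ i ∧ i < (xs.length : Int) ∧ gcMask xs i = gcMask ys i) ↔
      (xs.zip ys).countP (fun q => decide (q.1 ≠ q.2)) = 1 := by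
  rw [← one_diff_iff xs ys hlen hne]
  constructor
  · rintro ⟨i, hi0, hilt, hmask⟩
    unfold gcMask at hmask
    have htake := congrArg (fun p : Int × List Char × List Char => p.2.1) hmask
    have hdrop := congrArg (fun p : Int × List Char × List Char => p.2.2) hmask
    simp only at htake hdrop
    rw [PySem.List.slice_to xs hi0, PySem.List.slice_to ys hi0] at htake
    rw [PySem.List.slice_from xs (by omega : (0:Int) ≤ i + 1),
      PySem.List.slice_from ys (by omega : (0:Int) ≤ i + 1)] at hdrop
    refine ⟨i.toNat, by omega, htake, ?_⟩
    have : (i + 1).toNat = i.toNat + 1 := by omega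
    rwa [this] at hdrop
  · rintro ⟨t, ht, htake, hdrop⟩
    refine ⟨(t : Int), by omega, by exact_mod_cast ht, ?_⟩
    unfold gcMask
    rw [PySem.List.slice_to xs (by omega), PySem.List.slice_to ys (by omega),
      PySem.List.slice_from xs (by omega), PySem.List.slice_from ys (by omega)]
    have h1 : ((t : Int)).toNat = t := by omega
    have h2 : ((t : Int) + 1).toNat = t + 1 := by omega
    rw [h1, h2, htake, hdrop]

theorem can_transform_self (a : String) : can_transform a a = false := by
  cases hct : can_transform a a with
  | false => rfl
  | true =>
    have h1 := (can_transform_countP a a rfl).mp hct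
    rw [(zip_countP_eq_zero a.toList a.toList rfl).mpr rfl] at h1
    simp at h1

theorem mem_gcMatched_iff (items : List (String × List Int))
    (hnd : (items.map (·.1)).Nodup)
    (hlen : ∀ p ∈ items, ∀ q ∈ items, p.1.toList.length = q.1.toList.length)
    (a b : Int) :
    (a, b) ∈ gcMatched items ↔
      ∃ (ka kb : Nat) (ha : ka < items.length) (hb : kb < items.length),
        a = (ka : Int) ∧ b = (kb : Int) ∧ ka ≠ kb ∧ can_transform items[ka].1 items[kb].1 := by
  have hkeyne : ∀ (ka kb : Nat) (ha : ka < items.length) (hb : kb < items.length), ka ≠ kb →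
      items[ka].1.toList ≠ items[kb].1.toList := by
    intro ka kb ha hb hkk he
    apply hkk
    have he' : items[ka].1 = items[kb].1 := String.toList_inj.mp he
    have h1 : (items.map (·.1))[ka]'(by simpa) = (items.map (·.1))[kb]'(by simpa) := by
      simpa using he'
    exact (hnd.getElem_inj_iff).mp h1
  have hlen' : ∀ (ka kb : Nat) (ha : ka < items.length) (hb : kb < items.length),
      items[ka].1.toList.length = items[kb].1.toList.length := by
    intro ka kb ha hb
    exact hlen items[ka] (items.getElem_mem ha) items[kb] (items.getElem_mem hb)
  rw [mem_gcMatched]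
  constructor
  · rintro ⟨c, h1, h2, hne⟩
    obtain ⟨ka, ha, rfl, i, hi0, hia, hca⟩ := (mem_gcStream items c _).mp h1
    obtain ⟨kb, hb, rfl, i', hi0', hib, hcb⟩ := (mem_gcStream items c _).mp h2
    have hkk : ka ≠ kb := fun he => hne (by rw [he])
    have hii : i = i' := by
      have := congrArg (fun p : Int × List Char × List Char => p.1) (hca.symm.trans hcb)
      simpa [gcMask] using this
    subst hii
    have hmask : gcMask items[ka].1.toList i = gcMask items[kb].1.toList i :=
      hca.symm.trans hcb
    have hcount := (mask_iff_one_diff items[ka].1.toList items[kb].1.toList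
      (hlen' ka kb ha hb) (hkeyne ka kb ha hb hkk)).mp ⟨i, hi0, hia, hmask⟩
    exact ⟨ka, kb, ha, hb, rfl, rfl, hkk,
      (can_transform_countP items[ka].1 items[kb].1 (hlen' ka kb ha hb)).mpr hcount⟩
  · rintro ⟨ka, kb, ha, hb, rfl, rfl, hkk, hct⟩
    have hcount := (can_transform_countP items[ka].1 items[kb].1 (hlen' ka kb ha hb)).mp hct
    obtain ⟨i, hi0, hia, hmask⟩ := (mask_iff_one_diff items[ka].1.toList items[kb].1.toList
      (hlen' ka kb ha hb) (hkeyne ka kb ha hb hkk)).mpr hcount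
    refine ⟨gcMask items[ka].1.toList i, ?_, ?_, by intro he; simp at he; omega⟩
    · exact (mem_gcStream items _ _).mpr ⟨ka, ha, rfl, i, hi0, hia, rfl⟩
    · refine (mem_gcStream items _ _).mpr ⟨kb, hb, rfl, i, hi0, ?_, hmask⟩
      rw [← hlen' ka kb ha hb]; exact hia

theorem gc_main (items : List (String × List Int))
    (hnd : (items.map (·.1)).Nodup)
    (hlen : ∀ p ∈ items, ∀ q ∈ items, p.1.toList.length = q.1.toList.length) :
    gcA items = gcB items := by
  rw [gcA_flatMap, gcB_flatMap]
  have hget : (PySem.List.pyRange 0 (items.length : Int) 1).map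
      (fun j => PySem.List.pyGetD items j ("", [])) = items :=
    PySem.List.map_pyGetD_pyRange_zero' items ("", [])
  have key : ∀ f : (String × List Int) → List (Int × String),
      items.flatMap f = (PySem.List.pyRange 0 (items.length : Int) 1).flatMap
        (fun j => f (PySem.List.pyGetD items j ("", []))) := by
    intro f
    conv_lhs => rw [← hget]
    rw [List.flatMap_map]
  rw [key (fun p1 => items.flatMap (fun p2 =>
    if can_transform p1.1 p2.1 = true then gcBlock p1 p2 else []))]
  apply List.flatMap_congr
  intro j1 hj1
  rw [key (fun p2 =>
    if can_transform (PySem.List.pyGetD items j1 ("", [])).1 p2.1 = true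
    then gcBlock (PySem.List.pyGetD items j1 ("", [])) p2 else [])]
  apply List.flatMap_congr
  intro j2 hj2
  obtain ⟨hj1a, hj1b⟩ := PySem.List.mem_pyRange_one.mp hj1
  obtain ⟨hj2a, hj2b⟩ := PySem.List.mem_pyRange_one.mp hj2
  have e1 : PySem.List.pyGetD items j1 ("", []) = items[j1.toNat]'(by omega) :=
    PySem.List.pyGetD_eq_getElem items ("", []) hj1a hj1b
  have e2 : PySem.List.pyGetD items j2 ("", []) = items[j2.toNat]'(by omega) :=
    PySem.List.pyGetD_eq_getElem items ("", []) hj2a hj2b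
  by_cases hjj : j1 = j2
  · subst hjj
    rw [e1, can_transform_self]
    have hmem : (j1, j1) ∉ gcMatched items := by
      intro hmem
      obtain ⟨ka, kb, ha, hb, hka, hkb, hkk, -⟩ :=
        (mem_gcMatched_iff items hnd hlen j1 j1).mp hmem
      exact hkk (by omega)
    rw [if_neg hmem]
    simp
  · have hkk : j1.toNat ≠ j2.toNat := by omega
    by_cases hct : can_transform (items[j1.toNat]'(by omega)).1 (items[j2.toNat]'(by omega)).1
    · have hmem : (j1, j2) ∈ gcMatched items :=
        (mem_gcMatched_iff items hnd hlen j1 j2).mpr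
          ⟨j1.toNat, j2.toNat, by omega, by omega, by omega, by omega, hkk, hct⟩
      rw [e1, e2, if_pos hmem, if_pos hct]
    · have hmem : (j1, j2) ∉ gcMatched items := by
        intro hmem
        obtain ⟨ka, kb, ha, hb, hka, hkb, -, hct'⟩ :=
          (mem_gcMatched_iff items hnd hlen j1 j2).mp hmem
        apply hct
        have hka' : ka = j1.toNat := by omega
        have hkb' : kb = j2.toNat := by omega
        subst hka' hkb'
        exact hct'
      rw [e1, e2, if_neg hmem, if_neg (by simpa using hct)]

-- ===== VERDICT (by name: the statement is the Claim_ definition above) =====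
theorem keys_ofList_rows (rows : List (String × List Int)) :
    (PySem.Dict.ofList rows).keys = PySem.Set.ofList (rows.map (·.1)) := by
  have h := PySem.Dict.keys_foldl_insert_key (ν := List Int) rows (fun p => p.1)
    (fun _ p => p.2) PySem.Dict.empty
  simpa [PySem.Set.update] using h

theorem set_len_le_one_of_const (l : List Int) (h : ∀ x ∈ l, ∀ y ∈ l, x = y) :
    ¬ (1 < PySem.Set.len (PySem.Set.ofList l)) := by
  intro hlt
  have hnd := PySem.Set.nodup_ofList (xs := l)
  cases hs : PySem.Set.ofList l with
  | nil => simp [PySem.Set.len, hs] at hlt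
  | cons a t =>
    cases ht : t with
    | nil => simp [PySem.Set.len, hs, ht] at hlt
    | cons b t' =>
      have ha : a ∈ PySem.Set.ofList l := by rw [hs]; exact List.mem_cons_self
      have hb : b ∈ PySem.Set.ofList l := by rw [hs, ht]; simp
      have hab : a = b :=
        h a ((PySem.Set.mem_ofList _ _).mp ha) b ((PySem.Set.mem_ofList _ _).mp hb)
      rw [hs, ht] at hnd
      simp [hab] at hnd

theorem generate_changes_spec : Claim_equal_generate_changes := by
  intro rows _hdom hpre
  unfold Spec_generate_changes generate_changes generate_changes_alt
  have hkey : ∀ r ∈ (PySem.Dict.ofList rows).items, r.1 ∈ rows.map (·.1) := by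
    intro r hr
    have := PySem.Dict.mem_keys_of_mem_items _ hr
    rw [keys_ofList_rows] at this
    exact (PySem.Set.mem_ofList _ _).mp this
  have hguard : ¬ (1 < PySem.Set.len (PySem.Set.ofList
      ((PySem.Dict.ofList rows).keys.map (fun k => PySem.Str.len k)))) := by
    apply set_len_le_one_of_const
    intro x hx y hy
    obtain ⟨kx, hkx, rfl⟩ := List.mem_map.mp hx
    obtain ⟨ky, hky, rfl⟩ := List.mem_map.mp hy
    simp only [PySem.Dict.keys, List.mem_map] at hkx hky
    obtain ⟨px, hpx, rfl⟩ := hkx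
    obtain ⟨py, hpy, rfl⟩ := hky
    obtain ⟨px', hpx', hex⟩ := List.mem_map.mp (hkey px hpx)
    obtain ⟨py', hpy', hey⟩ := List.mem_map.mp (hkey py hpy)
    rw [PySem.Str.len_eq, PySem.Str.len_eq, ← hex, ← hey]
    exact_mod_cast hpre px' hpx' py' hpy'
  rw [if_neg hguard]
  apply gc_main
  · have h := PySem.Dict.nodup_keys_ofList rows
    simpa [PySem.Dict.keys] using h
  · intro p hp q hq
    obtain ⟨p', hp', hpe⟩ := List.mem_map.mp (hkey p hp)
    obtain ⟨q', hq', hqe⟩ := List.mem_map.mp (hkey q hq)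
    rw [← hpe, ← hqe]
    exact hpre p' hp' q' hq'
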